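-- pv_equiv track=rewrite | github.com/EdwardAdelin/FLC_an3_sem1 | lab/lab5/lab5_hw.py | dfa_check
-- ===== SOURCE A (Python) =====
-- def dfa_check(word):
--     state = 0
--     for char in word:
--         if state == 0:
--             if char == 'a':
--                 state = 1
--             else:
--                 state = 3
--         elif state == 1:
--             if char == 'b':
--                 state = 2
--             else:
--                 state = 3
--         elif state == 2:
--             state = 2
--         elif state == 3:
--             if char == 'a':
--                 state = 4
--             else:
--                 state = 3
--         elif state == 4:
--             if char == 'b':
--                 state = 2
--             else:
--                 state = 3
--     return state == 2
-- ===== SOURCE B (Python) =====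
-- def dfa_check(word):
--     # The machine accepts exactly the words containing a maximal run of 'a's
--     # of odd length immediately followed by 'b' (the accept state is absorbing).
--     n = len(word)
--     i = 0
--     while i < n:
--         if word[i] != 'a':
--             i += 1
--         else:
--             j = i
--             while j < n and word[j] == 'a':
--                 j += 1
--             if (j - i) % 2 == 1 and j < n and word[j] == 'b':
--                 return True
--             i = j
--     return False
-- ===== Notes on version B (the rewrite author's own statement) =====
-- stated objective: alternative
-- what changed: Replaces the explicit 5-state DFA loop with a run-scanning search: skip to each maximal run of 'a's and accept iff some such run has odd length and is immediately followed by 'b'.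
import Mathlib
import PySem

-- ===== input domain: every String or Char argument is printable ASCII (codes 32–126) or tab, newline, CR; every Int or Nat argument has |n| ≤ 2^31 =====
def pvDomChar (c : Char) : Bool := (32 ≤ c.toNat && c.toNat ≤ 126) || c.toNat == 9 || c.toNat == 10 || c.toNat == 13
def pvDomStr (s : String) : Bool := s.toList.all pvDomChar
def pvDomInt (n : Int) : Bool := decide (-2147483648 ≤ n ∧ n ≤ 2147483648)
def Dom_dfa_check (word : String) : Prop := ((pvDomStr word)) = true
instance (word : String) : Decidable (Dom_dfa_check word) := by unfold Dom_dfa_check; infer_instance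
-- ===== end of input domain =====

-- B replaces the explicit 5-state DFA loop by a run-scanning search: accept iff some
-- maximal run of 'a's of odd length is immediately followed by 'b' (alternative, same cost).


-- ===== PORT A =====
-- the loop body of A, branch for branch
def dfaStep (state : Int) (char : Char) : Int :=
  if state = 0 then (if char = 'a' then 1 else 3)
  else if state = 1 then (if char = 'b' then 2 else 3)
  else if state = 2 then 2
  else if state = 3 then (if char = 'a' then 4 else 3)
  else if state = 4 then (if char = 'b' then 2 else 3)
  else state

def dfa_check (word : String) : Bool :=
  (word.toList.foldl dfaStep 0) == 2

-- ===== PORT B =====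
-- the inner `while j < n and word[j] == 'a'` of Source B: length of the leading run of 'a's
-- and the suffix after it (Source B keeps indices i/j; here i/j become the remaining suffix)
def spanA : List Char → Nat × List Char
  | [] => (0, [])
  | c :: rest => if c = 'a' then ((spanA rest).1 + 1, (spanA rest).2) else (0, c :: rest)

theorem spanA_snd_length_le : ∀ cs : List Char, (spanA cs).2.length ≤ cs.length := by
  intro cs
  induction cs with
  | nil => simp [spanA]
  | cons c rest ih =>
      by_cases h : c = 'a' <;> simp [spanA, h]
      omega

-- the outer `while i < n` loop of Source B, as recursion on the remaining suffix
def bGo : List Char → Bool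
  | [] => false
  | c :: rest =>
    if c ≠ 'a' then bGo rest
    else
      -- run = (spanA (c::rest)).1 ; position j = suffix (spanA (c::rest)).2
      if (spanA rest).1.succ % 2 = 1 && ((spanA rest).2.head? == some 'b') then true
      else bGo (spanA rest).2
  termination_by cs => cs.length
  decreasing_by
    · simp
    · have := spanA_snd_length_le rest; simp; omega

def dfa_check_alt (word : String) : Bool := bGo word.toList

-- ===== PRECONDITION & SPEC =====
def Spec_dfa_check (word : String) (out : Bool) : Prop := out = dfa_check_alt word
instance (word : String) (out : Bool) : Decidable (Spec_dfa_check word out) := by unfold Spec_dfa_check; infer_instance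

-- ===== CLAIM (what is proved, stated in full; the proofs are below) =====
def Claim_equal_dfa_check : Prop := ∀ (word : String), Dom_dfa_check word → Spec_dfa_check word (dfa_check word)

-- ===== LEMMAS AND PROOFS =====

-- state 2 is absorbing
theorem foldl_two : ∀ cs : List Char, cs.foldl dfaStep 2 = 2 := by
  intro cs; induction cs with
  | nil => rfl
  | cons c rest ih => simpa [dfaStep] using ih

-- the head of (spanA cs).2 is never 'a'
theorem spanA_head : ∀ cs : List Char, ¬ ((spanA cs).2.head? = some 'a') := by
  intro cs
  induction cs with
  | nil => simp [spanA]
  | cons c rest ih =>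
      by_cases h : c = 'a'
      · simpa [spanA, h] using ih
      · simp [spanA, h]

-- consuming the leading run of 'a's from state 3 / state 4 flips the state iff the run is odd
theorem foldl_span :
    ∀ cs : List Char,
      (cs.foldl dfaStep 3 =
        (if (spanA cs).1 % 2 = 1 then (spanA cs).2.foldl dfaStep 4 else (spanA cs).2.foldl dfaStep 3)) ∧
      (cs.foldl dfaStep 4 =
        (if (spanA cs).1 % 2 = 1 then (spanA cs).2.foldl dfaStep 3 else (spanA cs).2.foldl dfaStep 4)) := by
  intro cs
  induction cs with
  | nil => simp [spanA]
  | cons c rest ih =>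
      by_cases h : c = 'a'
      · obtain ⟨ih3, ih4⟩ := ih
        constructor
        · show (rest.foldl dfaStep (dfaStep 3 c)) = _
          simp [dfaStep, h, spanA, ih4]
          rcases Nat.mod_two_eq_zero_or_one (spanA rest).1 with hp | hp <;>
            simp [hp, Nat.succ_mod_two_eq_one_iff]
        · show (rest.foldl dfaStep (dfaStep 4 c)) = _
          simp [dfaStep, h, spanA, ih3]
          rcases Nat.mod_two_eq_zero_or_one (spanA rest).1 with hp | hp <;>
            simp [hp, Nat.succ_mod_two_eq_one_iff]
      · simp [spanA, h]

-- acceptance from state 0 equals acceptance from state 3, and 1 vs 4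
theorem accept_zero_three :
    ∀ cs : List Char,
      ((cs.foldl dfaStep 0 == 2) = (cs.foldl dfaStep 3 == 2)) ∧
      ((cs.foldl dfaStep 1 == 2) = (cs.foldl dfaStep 4 == 2)) := by
  intro cs
  induction cs with
  | nil => decide
  | cons c rest ih =>
      obtain ⟨ih0, ih1⟩ := ih
      constructor
      · show ((rest.foldl dfaStep (dfaStep 0 c) == 2)) = ((rest.foldl dfaStep (dfaStep 3 c) == 2))
        by_cases h : c = 'a' <;> simp [dfaStep, h, ih1]
      · show ((rest.foldl dfaStep (dfaStep 1 c) == 2)) = ((rest.foldl dfaStep (dfaStep 4 c) == 2))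
        by_cases h : c = 'b' <;> simp [dfaStep, h]

-- main bridge: acceptance from state 3 is exactly bGo
theorem accept_three_bGo : ∀ (n : Nat) (cs : List Char), cs.length ≤ n →
    ((cs.foldl dfaStep 3 == 2) = bGo cs) := by
  intro n
  induction n with
  | zero =>
      intro cs h
      have : cs = [] := List.eq_nil_of_length_eq_zero (Nat.le_zero.mp h)
      subst this; simp [bGo]
  | succ n ih =>
      intro cs hlen
      match cs with
      | [] => simp [bGo]
      | c :: rest =>
        by_cases h : c = 'a'
        · subst h
          have hspan := (foldl_span ('a' :: rest)).1
          have hk : (spanA ('a' :: rest)).1 = (spanA rest).1 + 1 := by simp [spanA]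
          have hr : (spanA ('a' :: rest)).2 = (spanA rest).2 := by simp [spanA]
          have hrle : (spanA rest).2.length ≤ rest.length := spanA_snd_length_le rest
          rw [bGo]
          simp only [hk, hr] at hspan
          rcases Nat.mod_two_eq_zero_or_one (spanA rest).1 with hp | hp
          · -- run length (k+1) odd: state 4 after the run
            have hodd : ((spanA rest).1 + 1) % 2 = 1 := by omega
            rw [hspan]
            simp only [hodd]
            match hres : (spanA rest).2 with
            | [] => simp [bGo]
            | c' :: rs =>
                have hc' : ¬ (c' = 'a') := by
                  have := spanA_head rest; rw [hres] at this; simpa using this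
                by_cases hb : c' = 'b'
                · subst hb
                  have : (rs.foldl dfaStep (dfaStep 4 'b') == 2) = true := by
                    simp [dfaStep, foldl_two]
                  simp only [hodd, hres] at *
                  simp [this]
                · have h4 : (rs.foldl dfaStep (dfaStep 4 c') == 2) = bGo rs := by
                    have hrs : rs.length ≤ n := by
                      have : rs.length + 1 ≤ rest.length := by
                        rw [hres] at hrle; simpa using hrle
                      simp at hlen; omega
                    simpa [dfaStep, hb] using ih rs hrs
                  have hbGo : bGo (c' :: rs) = bGo rs := by rw [bGo]; simp [hc']
                  simp only [hodd, hres] at *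
                  simp [hb, h4, hbGo]
          · -- run length (k+1) even: state 3 after the run
            have heven : ((spanA rest).1 + 1) % 2 = 0 := by omega
            have hcond : (((spanA rest).1.succ % 2 = 1 : Bool) && ((spanA rest).2.head? == some 'b')) = false := by
              simp [Nat.succ_eq_add_one, heven]
            rw [hspan]
            have h3 : ((spanA rest).2.foldl dfaStep 3 == 2) = bGo (spanA rest).2 := by
              apply ih
              simp at hlen; omega
            simp only [Nat.succ_eq_add_one, heven] at *
            simp [h3]
        · have hstep : dfaStep 3 c = 3 := by
            by_cases hb : c = 'b' <;> simp [dfaStep, h, hb]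
          have : (rest.foldl dfaStep 3 == 2) = bGo rest := by
            apply ih; simp at hlen; omega
          rw [bGo]
          simp [h, hstep, this]

-- ===== VERDICT (by name: the statement is the Claim_ definition above) =====
theorem dfa_check_spec : Claim_equal_dfa_check := by
  intro word _
  show dfa_check word = dfa_check_alt word
  unfold dfa_check dfa_check_alt
  rw [(accept_zero_three word.toList).1]
  exact accept_three_bGo word.toList.length word.toList le_rfl
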